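-- pv_equiv track=rewrite | github.com/RexVH/St-MT-Evaluation-app | pages/00_01_Generate_Template.py | normalize_rows_to_n_translations
-- ===== SOURCE A (Python) =====
-- from typing import List, Dict, Tuple, Optional
--
-- def normalize_rows_to_n_translations(
--     sources: List[str],
--     t_cols: Dict[int, List[str]],
--     n: int,
-- ) -> List[Tuple[int, str, List[str]]]:
--     """
--     Returns list of tuples: (item_id, source, [t1..tN])
--     Missing translations become "".
--     Extra translations beyond N are ignored.
--     """
--     rows: List[Tuple[int, str, List[str]]] = []
--     for i, src in enumerate(sources, start=1):
--         ts: List[str] = []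
--         for k in range(1, n + 1):
--             col = t_cols.get(k, [])
--             ts.append(col[i - 1] if i - 1 < len(col) else "")
--         rows.append((i, src, ts))
--     return rows
-- ===== SOURCE B (Python) =====
-- def normalize_rows_to_n_translations(sources, t_cols, n):
--     # Column-first: materialize each of the n translation columns padded/truncated
--     # to len(sources), then assemble rows by picking across the column table.
--     S = len(sources)
--     columns = []
--     for k in range(1, n + 1):
--         col = t_cols.get(k, [])
--         columns.append(col[:S] + [""] * (S - len(col)))
--     return [(i, src, [c[i - 1] for c in columns])
--             for i, src in enumerate(sources, start=1)]
-- ===== Notes on version B (the rewrite author's own statement) =====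
-- stated objective: alternative
-- what changed: B builds the n padded/truncated translation columns once (slice + replicate padding) and then assembles rows by indexing into that column table, instead of A's per-row dict lookup with a per-cell bounds check.
import Mathlib
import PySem

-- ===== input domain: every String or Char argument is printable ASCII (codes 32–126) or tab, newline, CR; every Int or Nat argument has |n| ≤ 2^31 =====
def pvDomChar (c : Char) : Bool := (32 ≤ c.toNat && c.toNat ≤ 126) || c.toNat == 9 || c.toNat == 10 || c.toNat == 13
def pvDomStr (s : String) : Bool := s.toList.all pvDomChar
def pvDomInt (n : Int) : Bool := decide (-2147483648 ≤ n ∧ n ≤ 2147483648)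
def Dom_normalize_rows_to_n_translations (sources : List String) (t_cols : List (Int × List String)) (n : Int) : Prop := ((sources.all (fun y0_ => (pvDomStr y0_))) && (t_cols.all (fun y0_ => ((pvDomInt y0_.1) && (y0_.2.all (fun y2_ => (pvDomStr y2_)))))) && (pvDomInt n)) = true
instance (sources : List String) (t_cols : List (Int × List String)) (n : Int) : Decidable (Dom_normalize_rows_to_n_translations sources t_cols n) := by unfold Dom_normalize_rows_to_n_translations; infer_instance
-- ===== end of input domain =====

-- B builds the padded/truncated translation columns once and assembles rows from that column table; alternative decomposition, same asymptotic cost.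

-- ===== PORT A =====
def normalize_rows_to_n_translations (sources : List String) (t_cols : List (Int × List String)) (n : Int) : List (Int × String × List String) :=
  (PySem.List.enumerate sources 1).foldl (fun rows p =>
    let i := p.1
    let src := p.2
    let ts := (PySem.List.pyRange 1 (n + 1) 1).foldl (fun ts k =>
      let col := PySem.Dict.getD (PySem.Dict.mk t_cols) k []
      ts ++ [if i - 1 < (col.length : Int) then (PySem.List.pyGet? col (i - 1)).getD "" else ""]) []
    rows ++ [(i, src, ts)]) []

-- ===== PORT B =====
def normalize_rows_to_n_translations_alt (sources : List String) (t_cols : List (Int × List String)) (n : Int) : List (Int × String × List String) :=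
  let S := sources.length
  let columns := (PySem.List.pyRange 1 (n + 1) 1).map (fun k =>
    let col := PySem.Dict.getD (PySem.Dict.mk t_cols) k []
    col.take S ++ List.replicate (S - col.length) "")
  (PySem.List.enumerate sources 1).map (fun p =>
    (p.1, p.2, columns.map (fun c => (PySem.List.pyGet? c (p.1 - 1)).getD "")))

-- ===== PRECONDITION & SPEC =====
def Spec_normalize_rows_to_n_translations (sources : List String) (t_cols : List (Int × List String)) (n : Int) (out : List (Int × String × List String)) : Prop := out = normalize_rows_to_n_translations_alt sources t_cols n
instance (sources : List String) (t_cols : List (Int × List String)) (n : Int) (out : List (Int × String × List String)) : Decidable (Spec_normalize_rows_to_n_translations sources t_cols n out) := by unfold Spec_normalize_rows_to_n_translations; infer_instance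

-- ===== CLAIM (what is proved, stated in full; the proofs are below) =====
def Claim_equal_normalize_rows_to_n_translations : Prop := ∀ (sources : List String) (t_cols : List (Int × List String)) (n : Int), Dom_normalize_rows_to_n_translations sources t_cols n → Spec_normalize_rows_to_n_translations sources t_cols n (normalize_rows_to_n_translations sources t_cols n)

-- ===== LEMMAS AND PROOFS =====

lemma cell_eq (t_cols : List (Int × List String)) (S j : Nat) (hj : j < S) (k : Int) :
    (let col := PySem.Dict.getD (PySem.Dict.mk t_cols) k []
     if ((1 : Int) + j) - 1 < (col.length : Int) then
       (PySem.List.pyGet? col (((1 : Int) + j) - 1)).getD "" else "")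
    = (PySem.List.pyGet?
        ((PySem.Dict.getD (PySem.Dict.mk t_cols) k []).take S ++
          List.replicate (S - (PySem.Dict.getD (PySem.Dict.mk t_cols) k []).length) "")
        (((1 : Int) + j) - 1)).getD "" := by
  set col := PySem.Dict.getD (PySem.Dict.mk t_cols) k [] with hcol
  have hidx : ((1 : Int) + j) - 1 = (j : Int) := by ring
  rw [hidx]
  have hlen : (col.take S ++ List.replicate (S - col.length) "").length = S := by
    simp [List.length_take]; omega
  have hjlt : j < (col.take S ++ List.replicate (S - col.length) "").length := by omega
  rw [PySem.List.pyGet?_natCast, List.getElem?_eq_getElem hjlt]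
  by_cases h : j < col.length
  · have : ((j : Int)) < (col.length : Int) := by exact_mod_cast h
    simp only [this, if_pos]
    rw [PySem.List.pyGet?_natCast, List.getElem?_eq_getElem h]
    have hjt : j < (col.take S).length := by simp [List.length_take]; omega
    rw [List.getElem_append_left hjt, List.getElem_take]
  · have : ¬ ((j : Int)) < (col.length : Int) := by exact_mod_cast h
    simp only [this, if_neg, not_false_iff]
    have hge : (col.take S).length ≤ j := by simp [List.length_take]; omega
    rw [List.getElem_append_right hge]
    simp

-- ===== VERDICT (by name: the statement is the Claim_ definition above) =====
theorem normalize_rows_to_n_translations_spec : Claim_equal_normalize_rows_to_n_translations := by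
  intro sources t_cols n _
  unfold Spec_normalize_rows_to_n_translations
  unfold normalize_rows_to_n_translations normalize_rows_to_n_translations_alt
  simp only [PySem.List.foldl_append_singleton_eq_map, List.nil_append, List.map_map]
  apply List.map_congr_left
  intro p hp
  obtain ⟨j, hj, rfl⟩ := (PySem.List.mem_enumerate_iff sources 1 p).mp hp
  refine Prod.ext rfl (Prod.ext rfl ?_)
  apply List.map_congr_left
  intro k _
  exact cell_eq t_cols sources.length j hj k
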